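-- pv_equiv track=rewrite | github.com/racqediyo1-pixel/ai-data-assistant | backend/app/sql_ai.py | normalize_typos
-- ===== SOURCE A (Python) =====
-- def normalize_typos(text: str) -> str:
--     fixes = {
--         "mny": "many",
--         "cnt": "count",
--         "stduents": "students",
--         "studnts": "students"
--     }
--
--     for wrong, right in fixes.items():
--         text = text.replace(wrong, right)
--
--     return text
-- ===== SOURCE B (Python) =====
-- def normalize_typos(text: str) -> str:
--     table = (("mny", "many"), ("cnt", "count"),
--              ("stduents", "students"), ("studnts", "students"))
--     out = []
--     i = 0
--     n = len(text)
--     while i < n: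
--         for wrong, right in table:
--             if text.startswith(wrong, i):
--                 out.append(right)
--                 i += len(wrong)
--                 break
--         else:
--             out.append(text[i])
--             i += 1
--     return "".join(out)
-- ===== Notes on version B (the rewrite author's own statement) =====
-- stated objective: alternative
-- what changed: A makes four separate full-text str.replace passes (one per typo); B makes a single left-to-right pass that at each position tries the typo table as a prefix and emits the fix or the character, building the output once. Pre_ excludes texts containing 'stduentstudnts' or 'studntstduents', the overlapping-typo corners where an earlier replacement regenerates a later typo across its boundary and sequential replace vs single-pass substitution are both defensible.
-- outside the precondition, e.g. on normalize_typos('stduentstudnts'): A returns 'studentstudents', B returns 'studentstudnts'; on normalize_typos('studntstduents'): A returns 'studentstudents', B returns 'studentstduents'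
import Mathlib
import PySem

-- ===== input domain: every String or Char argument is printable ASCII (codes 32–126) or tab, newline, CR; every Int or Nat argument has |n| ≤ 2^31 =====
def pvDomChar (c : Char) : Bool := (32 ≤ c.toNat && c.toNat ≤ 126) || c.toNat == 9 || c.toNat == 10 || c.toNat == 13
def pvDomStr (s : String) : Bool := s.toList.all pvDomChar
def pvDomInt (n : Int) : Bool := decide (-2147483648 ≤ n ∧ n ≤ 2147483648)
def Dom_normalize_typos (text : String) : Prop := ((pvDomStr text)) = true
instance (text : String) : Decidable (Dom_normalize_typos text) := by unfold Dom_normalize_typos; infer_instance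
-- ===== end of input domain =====

set_option maxRecDepth 8000


-- B replaces A's four sequential full-text str.replace passes by ONE left-to-right scan that tries the
-- typo table as a prefix at each position (objective: alternative single-pass algorithm).

-- ===== PORT A =====
def normalize_typos (text : String) : String :=
  let fixes : PySem.Dict String String :=
    PySem.Dict.ofList [("mny", "many"), ("cnt", "count"), ("stduents", "students"), ("studnts", "students")]
  fixes.items.foldl (fun t wr => PySem.Str.replace t wr.1 wr.2) text

-- ===== PORT B =====
-- B's single pass (Source B): at each position try each typo of the table as a prefix (startswith),
-- emit its fix and jump past it, else emit the character.
def pvScanB : List Char → List Char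
  | [] => []
  | c :: t =>
    if ['m','n','y'].isPrefixOf (c :: t) then
      ['m','a','n','y'] ++ pvScanB (t.drop 2)
    else if ['c','n','t'].isPrefixOf (c :: t) then
      ['c','o','u','n','t'] ++ pvScanB (t.drop 2)
    else if ['s','t','d','u','e','n','t','s'].isPrefixOf (c :: t) then
      ['s','t','u','d','e','n','t','s'] ++ pvScanB (t.drop 7)
    else if ['s','t','u','d','n','t','s'].isPrefixOf (c :: t) then
      ['s','t','u','d','e','n','t','s'] ++ pvScanB (t.drop 6)
    else
      c :: pvScanB t
termination_by l => l.length
decreasing_by all_goals (simp only [List.length_drop, List.length_cons]; omega)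

def normalize_typos_alt (text : String) : String :=
  String.ofList (pvScanB text.toList)

-- ===== PRECONDITION & SPEC =====
-- Pre_ excludes texts containing "stduentstudnts" or "studntstduents": there two typo occurrences overlap,
-- an earlier replacement regenerates a later typo across its boundary, and A's sequential-replace result
-- and B's single-pass result are both defensible readings of an unspecified corner.
def Pre_normalize_typos (text : String) : Prop :=
  PySem.Str.isIn "stduentstudnts" text = false ∧ PySem.Str.isIn "studntstduents" text = false
instance (text : String) : Decidable (Pre_normalize_typos text) := by unfold Pre_normalize_typos; infer_instance
def pvWitness_normalize_typos : String := "mny stduents and studnts cnt"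

def Spec_normalize_typos (text : String) (out : String) : Prop := out = normalize_typos_alt text
instance (text : String) (out : String) : Decidable (Spec_normalize_typos text out) := by unfold Spec_normalize_typos; infer_instance

-- ===== CLAIM (what is proved, stated in full; the proofs are below) =====
def Claim_equal_normalize_typos : Prop := ∀ (text : String), Dom_normalize_typos text → Pre_normalize_typos text → Spec_normalize_typos text (normalize_typos text)

-- ===== LEMMAS AND PROOFS =====

def pvRep (old new : List Char) : List Char → List Char
  | [] => []
  | c :: t =>
    if old.isPrefixOf (c :: t) then new ++ pvRep old new (t.drop (old.length - 1))
    else c :: pvRep old new t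
termination_by l => l.length
decreasing_by all_goals (simp only [List.length_drop, List.length_cons]; omega)

theorem pvRep_not (old n : List Char) (c : Char) (t : List Char) (h : ¬ old <+: (c :: t)) :
    pvRep old n (c :: t) = c :: pvRep old n t := by
  rw [pvRep, if_neg]
  simp only [List.isPrefixOf_iff_prefix]
  exact h

theorem pvRep_pos (h : Char) (o n t : List Char) :
    pvRep (h :: o) n ((h :: o) ++ t) = n ++ pvRep (h :: o) n t := by
  rw [List.cons_append, pvRep, if_pos]
  · simp
  · simp only [List.isPrefixOf_iff_prefix, ← List.cons_append]
    exact List.prefix_append _ _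

theorem pvRep_skip (h c : Char) (o n t : List Char) (hch : c ≠ h) :
    pvRep (h :: o) n (c :: t) = c :: pvRep (h :: o) n t := by
  apply pvRep_not
  intro hp
  exact hch (List.cons_prefix_cons.mp hp).1.symm

theorem pvRep_skipAll (h : Char) (o n a x : List Char) (ha : ∀ c ∈ a, c ≠ h) :
    pvRep (h :: o) n (a ++ x) = a ++ pvRep (h :: o) n x := by
  induction a with
  | nil => simp
  | cons d a' ih =>
      rw [List.cons_append, pvRep_skip _ _ _ _ _ (ha d (by simp)), ih (fun c hc => ha c (by simp [hc]))]
      simp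

theorem pvRep_head (h : Char) (o n' x : List Char) :
    (pvRep (h :: o) (h :: n') x).head? = x.head? := by
  cases x with
  | nil => rw [pvRep]
  | cons c t =>
      rw [pvRep]
      split
      · next hp =>
          have : c = h := by
            have := List.cons_prefix_cons.mp (List.isPrefixOf_iff_prefix.mp hp)
            exact this.1.symm
          simp [this]
      · simp

theorem pvRep_peel (h : Char) (o n' : List Char) (c : Char) (x y : List Char) (hch : c ≠ h)
    (he : pvRep (h :: o) (h :: n') x = c :: y) :
    ∃ x', x = c :: x' ∧ y = pvRep (h :: o) (h :: n') x' := by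
  have hh := pvRep_head h o n' x
  rw [he] at hh
  cases x with
  | nil => simp at hh
  | cons d t =>
      simp only [List.head?_cons, Option.some.injEq] at hh
      subst hh
      rw [pvRep_skip _ _ _ _ _ hch] at he
      exact ⟨t, rfl, (List.cons.injEq .. ▸ he).2.symm⟩

theorem pvRep_peelAll (h : Char) (o n' : List Char) (a x y : List Char) (ha : ∀ c ∈ a, c ≠ h)
    (he : pvRep (h :: o) (h :: n') x = a ++ y) :
    ∃ x', x = a ++ x' ∧ y = pvRep (h :: o) (h :: n') x' := by
  induction a generalizing x with
  | nil => exact ⟨x, rfl, by simpa using he.symm⟩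
  | cons d a' ih =>
      obtain ⟨x1, hx1, hy1⟩ := pvRep_peel h o n' d x (a' ++ y) (ha d (by simp)) (by simpa using he)
      obtain ⟨x', hx', hy'⟩ := ih x1 (fun c hc => ha c (by simp [hc])) hy1.symm
      exact ⟨x', by simp [hx1, hx'], hy'⟩

theorem pvRep_eq_go (old new : List Char) (hold : old ≠ []) :
    ∀ (fuel : Nat) (l acc : List Char), l.length ≤ fuel →
      PySem.Chars.replace.go old new fuel l acc = acc.reverse ++ pvRep old new l := by
  intro fuel
  induction fuel with
  | zero =>
      intro l acc hl
      have : l = [] := by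
        cases l with
        | nil => rfl
        | cons c t => simp at hl
      subst this
      simp [PySem.Chars.replace.go, pvRep]
  | succ f ih =>
      intro l acc hl
      cases l with
      | nil => simp [PySem.Chars.replace.go, pvRep]
      | cons c t =>
          rw [PySem.Chars.replace.go]
          split
          · next hp =>
              rw [pvRep, if_pos hp]
              have hlen : (List.drop old.length (c :: t)).length ≤ f := by
                cases old with
                | nil => exact absurd rfl hold
                | cons o0 o' =>
                    simp only [List.length_drop, List.length_cons] at *
                    omega
              rw [ih _ _ hlen]
              have hdrop : List.drop old.length (c :: t) = List.drop (old.length - 1) t := by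
                cases old with
                | nil => exact absurd rfl hold
                | cons o0 o' => simp
              rw [hdrop]
              simp
          · next hp =>
              rw [pvRep, if_neg hp]
              have hlen : t.length ≤ f := by simp at hl; omega
              rw [ih _ _ hlen]
              simp

theorem replace_eq_pvRep (s old new : List Char) (hold : old ≠ []) :
    PySem.Chars.replace s old new = pvRep old new s := by
  rw [PySem.Chars.replace, if_neg (by simpa using hold)]
  simpa using pvRep_eq_go old new hold s.length s [] le_rfl

def pvR1 : List Char → List Char := pvRep ['m','n','y'] ['m','a','n','y']
def pvR2 : List Char → List Char := pvRep ['c','n','t'] ['c','o','u','n','t']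
def pvR3 : List Char → List Char := pvRep ['s','t','d','u','e','n','t','s'] ['s','t','u','d','e','n','t','s']
def pvR4 : List Char → List Char := pvRep ['s','t','u','d','n','t','s'] ['s','t','u','d','e','n','t','s']
def pvChain (l : List Char) : List Char := pvR4 (pvR3 (pvR2 (pvR1 l)))

theorem pvPeel_nt (t : List Char) (h : ['n','t'] <+: pvR1 t) : ['n','t'] <+: t := by
  obtain ⟨y, hy⟩ := h
  obtain ⟨x', hx', -⟩ := pvRep_peelAll 'm' ['n','y'] ['a','n','y'] ['n','t'] t y (by simp) hy.symm
  exact ⟨x', hx'.symm⟩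

theorem pvPeel_tduents (t : List Char) (h : ['t','d','u','e','n','t','s'] <+: pvR2 (pvR1 t)) :
    ['t','d','u','e','n','t','s'] <+: t := by
  obtain ⟨y, hy⟩ := h
  obtain ⟨x1, hx1, -⟩ := pvRep_peelAll 'c' ['n','t'] ['o','u','n','t'] ['t','d','u','e','n','t','s'] (pvR1 t) y (by simp) hy.symm
  obtain ⟨x0, hx0, -⟩ := pvRep_peelAll 'm' ['n','y'] ['a','n','y'] ['t','d','u','e','n','t','s'] t x1 (by simp) hx1
  exact ⟨x0, hx0.symm⟩

theorem pvPeel_tudnts (t : List Char) (h : ['t','u','d','n','t','s'] <+: pvR3 (pvR2 (pvR1 t))) :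
    ['t','u','d','n','t','s'] <+: t := by
  obtain ⟨y, hy⟩ := h
  -- peel 't','u','d','n','t' through pvR3, then the final 's' by head preservation
  obtain ⟨x2, hx2, hy2⟩ := pvRep_peelAll 's' ['t','d','u','e','n','t','s'] ['t','u','d','e','n','t','s']
    ['t','u','d','n','t'] (pvR2 (pvR1 t)) ('s' :: y) (by simp) (by simpa using hy.symm)
  have hh := pvRep_head 's' ['t','d','u','e','n','t','s'] ['t','u','d','e','n','t','s'] x2
  rw [← hy2] at hh
  cases x2 with
  | nil => simp at hh
  | cons d t2 =>
      simp only [List.head?_cons, Option.some.injEq] at hh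
      subst hh
      have hx2' : pvR2 (pvR1 t) = ['t','u','d','n','t','s'] ++ t2 := by simpa using hx2
      obtain ⟨x1, hx1, -⟩ := pvRep_peelAll 'c' ['n','t'] ['o','u','n','t'] ['t','u','d','n','t','s'] (pvR1 t) _ (by simp) hx2'
      obtain ⟨x0, hx0, -⟩ := pvRep_peelAll 'm' ['n','y'] ['a','n','y'] ['t','u','d','n','t','s'] t x1 (by simp) hx1
      exact ⟨x0, hx0.symm⟩

theorem pvR4_students (x : List Char) (hx : ¬ ['t','u','d','n','t','s'] <+: x) :
    pvR4 (['s','t','u','d','e','n','t','s'] ++ x) = ['s','t','u','d','e','n','t','s'] ++ pvR4 x := by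
  show pvRep _ _ ('s'::'t'::'u'::'d'::'e'::'n'::'t'::'s'::x) = _
  rw [pvRep_not _ _ _ _ (by simp [List.cons_prefix_cons]),
      pvRep_skip _ _ _ _ _ (by decide), pvRep_skip _ _ _ _ _ (by decide),
      pvRep_skip _ _ _ _ _ (by decide), pvRep_skip _ _ _ _ _ (by decide),
      pvRep_skip _ _ _ _ _ (by decide), pvRep_skip _ _ _ _ _ (by decide),
      pvRep_not _ _ _ _ (by simp [List.cons_prefix_cons]; exact hx)]
  rfl

theorem pvR3_studnts (x : List Char) (hx : ¬ ['t','d','u','e','n','t','s'] <+: x) :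
    pvR3 (['s','t','u','d','n','t','s'] ++ x) = ['s','t','u','d','n','t','s'] ++ pvR3 x := by
  show pvRep _ _ ('s'::'t'::'u'::'d'::'n'::'t'::'s'::x) = _
  rw [pvRep_not _ _ _ _ (by simp [List.cons_prefix_cons]),
      pvRep_skip _ _ _ _ _ (by decide), pvRep_skip _ _ _ _ _ (by decide),
      pvRep_skip _ _ _ _ _ (by decide), pvRep_skip _ _ _ _ _ (by decide),
      pvRep_skip _ _ _ _ _ (by decide),
      pvRep_not _ _ _ _ (by simp [List.cons_prefix_cons]; exact hx)]
  rfl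

theorem pvScanB_mny (t : List Char) : pvScanB ('m'::'n'::'y'::t) = 'm'::'a'::'n'::'y':: pvScanB t := by
  rw [pvScanB]
  simp [List.isPrefixOf]

theorem pvScanB_cnt (t : List Char) : pvScanB ('c'::'n'::'t'::t) = 'c'::'o'::'u'::'n'::'t':: pvScanB t := by
  rw [pvScanB]
  simp [List.isPrefixOf]

theorem pvScanB_stduents (t : List Char) :
    pvScanB ('s'::'t'::'d'::'u'::'e'::'n'::'t'::'s'::t) = 's'::'t'::'u'::'d'::'e'::'n'::'t'::'s':: pvScanB t := by
  rw [pvScanB]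
  simp [List.isPrefixOf]

theorem pvScanB_studnts (t : List Char) :
    pvScanB ('s'::'t'::'u'::'d'::'n'::'t'::'s'::t) = 's'::'t'::'u'::'d'::'e'::'n'::'t'::'s':: pvScanB t := by
  rw [pvScanB]
  simp [List.isPrefixOf]

theorem pvScanB_default (c : Char) (t : List Char)
    (h1 : ¬ ['m','n','y'] <+: (c :: t)) (h2 : ¬ ['c','n','t'] <+: (c :: t))
    (h3 : ¬ ['s','t','d','u','e','n','t','s'] <+: (c :: t)) (h4 : ¬ ['s','t','u','d','n','t','s'] <+: (c :: t)) :
    pvScanB (c :: t) = c :: pvScanB t := by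
  rw [pvScanB]
  rw [if_neg (by simpa [List.isPrefixOf_iff_prefix] using h1),
      if_neg (by simpa [List.isPrefixOf_iff_prefix] using h2),
      if_neg (by simpa [List.isPrefixOf_iff_prefix] using h3),
      if_neg (by simpa [List.isPrefixOf_iff_prefix] using h4)]

theorem pvRep_nil (old new : List Char) : pvRep old new [] = [] := by rw [pvRep]

theorem pvMain : ∀ (n : Nat) (t : List Char), t.length ≤ n →
    ¬ (['s','t','d','u','e','n','t','s','t','u','d','n','t','s'] <:+: t) →
    ¬ (['s','t','u','d','n','t','s','t','d','u','e','n','t','s'] <:+: t) →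
    pvChain t = pvScanB t := by
  intro n
  induction n with
  | zero =>
      intro t ht _ _
      have : t = [] := List.eq_nil_of_length_eq_zero (Nat.le_zero.mp ht)
      subst this
      simp [pvChain, pvR1, pvR2, pvR3, pvR4, pvRep_nil, pvScanB]
  | succ n ih =>
      intro t ht hb1 hb2
      by_cases hm : ['m','n','y'] <+: t
      · obtain ⟨rest, hrest⟩ := hm
        subst hrest
        have hlen : rest.length ≤ n := by simp at ht; omega
        have e1 : pvR1 (['m','n','y'] ++ rest) = ['m','a','n','y'] ++ pvR1 rest := pvRep_pos 'm' ['n','y'] _ rest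
        have e2 : pvR2 (['m','a','n','y'] ++ pvR1 rest) = ['m','a','n','y'] ++ pvR2 (pvR1 rest) :=
          pvRep_skipAll 'c' _ _ _ _ (by simp)
        have e3 : pvR3 (['m','a','n','y'] ++ pvR2 (pvR1 rest)) = ['m','a','n','y'] ++ pvR3 (pvR2 (pvR1 rest)) :=
          pvRep_skipAll 's' _ _ _ _ (by simp)
        have e4 : pvR4 (['m','a','n','y'] ++ pvR3 (pvR2 (pvR1 rest))) = ['m','a','n','y'] ++ pvChain rest :=
          pvRep_skipAll 's' _ _ _ _ (by simp)
        show pvR4 (pvR3 (pvR2 (pvR1 _))) = _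
        rw [e1, e2, e3, e4]
        have hsfx : rest <:+ ['m','n','y'] ++ rest := ⟨_, rfl⟩
        rw [ih rest hlen (fun hb => hb1 (hb.trans hsfx.isInfix)) (fun hb => hb2 (hb.trans hsfx.isInfix))]
        simp only [List.cons_append, List.nil_append]
        exact (pvScanB_mny rest).symm
      · by_cases hcn : ['c','n','t'] <+: t
        · obtain ⟨rest, hrest⟩ := hcn
          subst hrest
          have hlen : rest.length ≤ n := by simp at ht; omega
          have e1 : pvR1 (['c','n','t'] ++ rest) = ['c','n','t'] ++ pvR1 rest :=
            pvRep_skipAll 'm' _ _ _ _ (by simp)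
          have e2 : pvR2 (['c','n','t'] ++ pvR1 rest) = ['c','o','u','n','t'] ++ pvR2 (pvR1 rest) :=
            pvRep_pos 'c' ['n','t'] _ _
          have e3 : pvR3 (['c','o','u','n','t'] ++ pvR2 (pvR1 rest)) = ['c','o','u','n','t'] ++ pvR3 (pvR2 (pvR1 rest)) :=
            pvRep_skipAll 's' _ _ _ _ (by simp)
          have e4 : pvR4 (['c','o','u','n','t'] ++ pvR3 (pvR2 (pvR1 rest))) = ['c','o','u','n','t'] ++ pvChain rest :=
            pvRep_skipAll 's' _ _ _ _ (by simp)
          show pvR4 (pvR3 (pvR2 (pvR1 _))) = _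
          rw [e1, e2, e3, e4]
          have hsfx : rest <:+ ['c','n','t'] ++ rest := ⟨_, rfl⟩
          rw [ih rest hlen (fun hb => hb1 (hb.trans hsfx.isInfix)) (fun hb => hb2 (hb.trans hsfx.isInfix))]
          simp only [List.cons_append, List.nil_append]
          exact (pvScanB_cnt rest).symm
        · by_cases hsd : ['s','t','d','u','e','n','t','s'] <+: t
          · obtain ⟨rest, hrest⟩ := hsd
            subst hrest
            have hlen : rest.length ≤ n := by simp at ht; omega
            have hnotud : ¬ ['t','u','d','n','t','s'] <+: rest := by
              intro hp
              obtain ⟨r, hr⟩ := hp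
              apply hb1
              refine List.IsPrefix.isInfix ⟨r, ?_⟩
              rw [← hr]
              rfl
            have e1 : pvR1 (['s','t','d','u','e','n','t','s'] ++ rest) = ['s','t','d','u','e','n','t','s'] ++ pvR1 rest :=
              pvRep_skipAll 'm' _ _ _ _ (by simp)
            have e2 : pvR2 (['s','t','d','u','e','n','t','s'] ++ pvR1 rest) = ['s','t','d','u','e','n','t','s'] ++ pvR2 (pvR1 rest) :=
              pvRep_skipAll 'c' _ _ _ _ (by simp)
            have e3 : pvR3 (['s','t','d','u','e','n','t','s'] ++ pvR2 (pvR1 rest)) = ['s','t','u','d','e','n','t','s'] ++ pvR3 (pvR2 (pvR1 rest)) :=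
              pvRep_pos 's' ['t','d','u','e','n','t','s'] _ _
            have e4 : pvR4 (['s','t','u','d','e','n','t','s'] ++ pvR3 (pvR2 (pvR1 rest))) = ['s','t','u','d','e','n','t','s'] ++ pvChain rest :=
              pvR4_students _ (fun hp => hnotud (pvPeel_tudnts rest hp))
            show pvR4 (pvR3 (pvR2 (pvR1 _))) = _
            rw [e1, e2, e3, e4]
            have hsfx : rest <:+ ['s','t','d','u','e','n','t','s'] ++ rest := ⟨_, rfl⟩
            rw [ih rest hlen (fun hb => hb1 (hb.trans hsfx.isInfix)) (fun hb => hb2 (hb.trans hsfx.isInfix))]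
            simp only [List.cons_append, List.nil_append]
            exact (pvScanB_stduents rest).symm
          · by_cases hsn : ['s','t','u','d','n','t','s'] <+: t
            · obtain ⟨rest, hrest⟩ := hsn
              subst hrest
              have hlen : rest.length ≤ n := by simp at ht; omega
              have hnotde : ¬ ['t','d','u','e','n','t','s'] <+: rest := by
                intro hp
                obtain ⟨r, hr⟩ := hp
                apply hb2
                refine List.IsPrefix.isInfix ⟨r, ?_⟩
                rw [← hr]
                rfl
              have e1 : pvR1 (['s','t','u','d','n','t','s'] ++ rest) = ['s','t','u','d','n','t','s'] ++ pvR1 rest :=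
                pvRep_skipAll 'm' _ _ _ _ (by simp)
              have e2 : pvR2 (['s','t','u','d','n','t','s'] ++ pvR1 rest) = ['s','t','u','d','n','t','s'] ++ pvR2 (pvR1 rest) :=
                pvRep_skipAll 'c' _ _ _ _ (by simp)
              have e3 : pvR3 (['s','t','u','d','n','t','s'] ++ pvR2 (pvR1 rest)) = ['s','t','u','d','n','t','s'] ++ pvR3 (pvR2 (pvR1 rest)) :=
                pvR3_studnts _ (fun hp => hnotde (pvPeel_tduents rest hp))
              have e4 : pvR4 (['s','t','u','d','n','t','s'] ++ pvR3 (pvR2 (pvR1 rest))) = ['s','t','u','d','e','n','t','s'] ++ pvChain rest :=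
                pvRep_pos 's' ['t','u','d','n','t','s'] _ _
              show pvR4 (pvR3 (pvR2 (pvR1 _))) = _
              rw [e1, e2, e3, e4]
              have hsfx : rest <:+ ['s','t','u','d','n','t','s'] ++ rest := ⟨_, rfl⟩
              rw [ih rest hlen (fun hb => hb1 (hb.trans hsfx.isInfix)) (fun hb => hb2 (hb.trans hsfx.isInfix))]
              simp only [List.cons_append, List.nil_append]
              exact (pvScanB_studnts rest).symm
            · cases t with
              | nil => simp [pvChain, pvR1, pvR2, pvR3, pvR4, pvRep_nil, pvScanB]
              | cons c t' =>
                  have hlen : t'.length ≤ n := by simp at ht; omega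
                  have f1 : pvR1 (c :: t') = c :: pvR1 t' := pvRep_not _ _ _ _ hm
                  have f2 : pvR2 (c :: pvR1 t') = c :: pvR2 (pvR1 t') := by
                    apply pvRep_not
                    intro hp
                    obtain ⟨hc1, hp'⟩ := List.cons_prefix_cons.mp hp
                    exact hcn (List.cons_prefix_cons.mpr ⟨hc1, pvPeel_nt t' hp'⟩)
                  have f3 : pvR3 (c :: pvR2 (pvR1 t')) = c :: pvR3 (pvR2 (pvR1 t')) := by
                    apply pvRep_not
                    intro hp
                    obtain ⟨hc1, hp'⟩ := List.cons_prefix_cons.mp hp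
                    exact hsd (List.cons_prefix_cons.mpr ⟨hc1, pvPeel_tduents t' hp'⟩)
                  have f4 : pvR4 (c :: pvR3 (pvR2 (pvR1 t'))) = c :: pvChain t' := by
                    apply pvRep_not
                    intro hp
                    obtain ⟨hc1, hp'⟩ := List.cons_prefix_cons.mp hp
                    exact hsn (List.cons_prefix_cons.mpr ⟨hc1, pvPeel_tudnts t' hp'⟩)
                  have hsfx : t' <:+ c :: t' := ⟨[c], rfl⟩
                  show pvR4 (pvR3 (pvR2 (pvR1 _))) = _
                  rw [f1, f2, f3, f4,
                    ih t' hlen (fun hb => hb1 (hb.trans hsfx.isInfix)) (fun hb => hb2 (hb.trans hsfx.isInfix)),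
                    pvScanB_default c t' hm hcn hsd hsn]

theorem pvPortA (text : String) :
    normalize_typos text = String.ofList (pvChain text.toList) := by
  unfold normalize_typos
  simp only []
  rw [show (PySem.Dict.ofList [("mny","many"),("cnt","count"),("stduents","students"),("studnts","students")] : PySem.Dict String String).items
        = [("mny","many"),("cnt","count"),("stduents","students"),("studnts","students")] from by decide]
  simp only [List.foldl, PySem.Str.replace, String.toList_ofList]
  rw [replace_eq_pvRep _ _ _ (by decide), replace_eq_pvRep _ _ _ (by decide),
      replace_eq_pvRep _ _ _ (by decide), replace_eq_pvRep _ _ _ (by decide)]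
  rfl

theorem pvFinal (text : String)
    (h1 : PySem.Str.isIn "stduentstudnts" text = false)
    (h2 : PySem.Str.isIn "studntstduents" text = false) :
    normalize_typos text = String.ofList (pvScanB text.toList) := by
  rw [pvPortA]
  congr 1
  apply pvMain text.toList.length _ le_rfl
  · intro hinf
    have ht : PySem.Str.isIn "stduentstudnts" text = true := by
      rw [PySem.Str.isIn_iff_infix]
      exact hinf
    rw [h1] at ht
    exact Bool.false_ne_true ht
  · intro hinf
    have ht : PySem.Str.isIn "studntstduents" text = true := by
      rw [PySem.Str.isIn_iff_infix]
      exact hinf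
    rw [h2] at ht
    exact Bool.false_ne_true ht

-- ===== VERDICT (by name: the statement is the Claim_ definition above) =====
theorem normalize_typos_spec : Claim_equal_normalize_typos := by
  intro text _hdom hpre
  exact pvFinal text hpre.1 hpre.2
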